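-- pv_equiv track=rewrite | github.com/AlexesPagan/Sof_Eng_Project | DormProject/ParsaPlaygroundCode/Demo/dormOutput.py | findStudentAdmin
-- ===== SOURCE A (Python) =====
-- def findStudentAdmin(dormitory, ID_num, roomNum, dorm, action):
--     perm_capacity = 0
--     curr_capacity = 0
--     for dormName in dormitory:                                                                             # access the dorm names from the dormitory library
--         roomNums = dormitory[dormName]                                                                     # unpacks the occupied rooms from the dormitory library
--         for room in roomNums:                                                                              # access the individual room numbers
--             students_ID = roomNums[room]                                                                   # unpacks the student IDs from the occupied rooms
--             for stu_ID in students_ID:                                                                     # for each ID in th student IDs previously unpacked...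
--                 if (stu_ID == ID_num and room == roomNum and dormName == dorm and action == 'remove'):     # check to see if the ID matches the one we're looking for and the action is remove
--                     return True                                                                            # greenlight to move to next step
--                 elif (stu_ID == ID_num and action == 'add'):                                               # if the student exists and the action was add...
--                     return False                                                                           # red light, they need to remove the student first
--     if (action == 'add'):
--         return True
--     return False
-- ===== SOURCE B (Python) =====
-- def findStudentAdmin(dormitory, ID_num, roomNum, dorm, action):
--     if action == 'remove':
--         return ID_num in dormitory.get(dorm, {}).get(roomNum, [])
--     if action == 'add':
--         return not any(ID_num in studs
--                        for rooms in dormitory.values()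
--                        for studs in rooms.values())
--     return False
-- ===== Notes on version B (the rewrite author's own statement) =====
-- stated objective: simpler
-- what changed: Dispatch on the action first: 'remove' becomes a direct two-level dict lookup followed by a membership test (no loops), 'add' a single existence scan over all student lists, anything else an immediate False, replacing A's unified triple-nested scan with mixed early returns.
import Mathlib
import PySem

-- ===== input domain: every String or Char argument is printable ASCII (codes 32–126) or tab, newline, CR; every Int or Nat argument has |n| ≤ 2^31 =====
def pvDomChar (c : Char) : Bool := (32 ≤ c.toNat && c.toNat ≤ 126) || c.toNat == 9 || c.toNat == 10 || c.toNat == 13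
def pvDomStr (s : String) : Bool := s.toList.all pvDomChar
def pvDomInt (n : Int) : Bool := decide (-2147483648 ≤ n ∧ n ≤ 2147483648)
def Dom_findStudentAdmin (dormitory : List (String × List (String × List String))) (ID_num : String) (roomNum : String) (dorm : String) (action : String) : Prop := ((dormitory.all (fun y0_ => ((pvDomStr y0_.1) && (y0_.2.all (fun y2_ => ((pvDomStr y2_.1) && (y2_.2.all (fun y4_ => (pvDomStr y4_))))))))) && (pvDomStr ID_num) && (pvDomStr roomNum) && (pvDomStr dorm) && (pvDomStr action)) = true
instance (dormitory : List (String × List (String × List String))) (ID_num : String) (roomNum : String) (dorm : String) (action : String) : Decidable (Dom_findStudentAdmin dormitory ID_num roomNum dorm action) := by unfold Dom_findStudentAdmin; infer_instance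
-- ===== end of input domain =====

-- B dispatches on the action first ('remove' = direct nested-dict lookup + membership, 'add' = one
-- existence scan, otherwise False) instead of A's unified triple-nested scan; objective: simpler.

-- ===== PORT A =====
-- innermost loop: `for stu_ID in students_ID: if …: return True elif …: return False`
def pvA_scanStudents (students : List String) (ID_num roomNum dorm action dormName room : String) : Option Bool :=
  match students with
  | [] => none
  | s :: rest =>
    if s == ID_num && room == roomNum && dormName == dorm && action == "remove" then some true
    else if s == ID_num && action == "add" then some false
    else pvA_scanStudents rest ID_num roomNum dorm action dormName room

-- middle loop: `for room in roomNums: students_ID = roomNums[room] …` (iterating a dict's keys and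
-- looking each up = iterating its (key, value) pairs)
def pvA_scanRooms (rooms : List (String × List String)) (ID_num roomNum dorm action dormName : String) : Option Bool :=
  match rooms with
  | [] => none
  | (room, studs) :: rest =>
    match pvA_scanStudents studs ID_num roomNum dorm action dormName room with
    | some b => some b
    | none => pvA_scanRooms rest ID_num roomNum dorm action dormName

-- outer loop: `for dormName in dormitory: roomNums = dormitory[dormName] …`
def pvA_scanDorms (dorms : List (String × List (String × List String))) (ID_num roomNum dorm action : String) : Option Bool :=
  match dorms with
  | [] => none
  | (dormName, rooms) :: rest =>
    match pvA_scanRooms rooms ID_num roomNum dorm action dormName with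
    | some b => some b
    | none => pvA_scanDorms rest ID_num roomNum dorm action

def findStudentAdmin (dormitory : List (String × List (String × List String))) (ID_num : String) (roomNum : String) (dorm : String) (action : String) : Bool :=
  match pvA_scanDorms dormitory ID_num roomNum dorm action with
  | some b => b
  | none => action == "add"

-- ===== PORT B =====
def findStudentAdmin_alt (dormitory : List (String × List (String × List String))) (ID_num : String) (roomNum : String) (dorm : String) (action : String) : Bool :=
  if action == "remove" then
    -- ID_num in dormitory.get(dorm, {}).get(roomNum, [])
    (PySem.Dict.getD (PySem.Dict.mk (PySem.Dict.getD (PySem.Dict.mk dormitory) dorm [])) roomNum []).contains ID_num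
  else if action == "add" then
    -- not any(ID_num in studs for rooms in dormitory.values() for studs in rooms.values())
    !(dormitory.any fun p => p.2.any fun q => q.2.contains ID_num)
  else
    false

-- ===== PRECONDITION & SPEC =====
-- Pre_ excludes association lists with duplicate dorm keys or duplicate room keys inside a dorm:
-- such inputs do not arise from a Python dict (duplicate keys of a dict collapse), and on them A's
-- pair-by-pair scan and B's first-match lookup are both accidental.
def Pre_findStudentAdmin (dormitory : List (String × List (String × List String))) (ID_num : String) (roomNum : String) (dorm : String) (action : String) : Prop :=
  (dormitory.map Prod.fst).Nodup ∧ ∀ p ∈ dormitory, (p.2.map Prod.fst).Nodup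
instance (dormitory : List (String × List (String × List String))) (ID_num : String) (roomNum : String) (dorm : String) (action : String) : Decidable (Pre_findStudentAdmin dormitory ID_num roomNum dorm action) := by unfold Pre_findStudentAdmin; infer_instance

def pvWitness_findStudentAdmin : (List (String × List (String × List String))) × String × String × String × String :=
  ([("A", [("1", ["s1", "s2"])]), ("B", [("1", ["s3"])])], "s1", "1", "A", "remove")

def Spec_findStudentAdmin (dormitory : List (String × List (String × List String))) (ID_num : String) (roomNum : String) (dorm : String) (action : String) (out : Bool) : Prop := out = findStudentAdmin_alt dormitory ID_num roomNum dorm action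
instance (dormitory : List (String × List (String × List String))) (ID_num : String) (roomNum : String) (dorm : String) (action : String) (out : Bool) : Decidable (Spec_findStudentAdmin dormitory ID_num roomNum dorm action out) := by unfold Spec_findStudentAdmin; infer_instance

-- ===== CLAIM (what is proved, stated in full; the proofs are below) =====
def Claim_equal_findStudentAdmin : Prop := ∀ (dormitory : List (String × List (String × List String))) (ID_num : String) (roomNum : String) (dorm : String) (action : String), Dom_findStudentAdmin dormitory ID_num roomNum dorm action → Pre_findStudentAdmin dormitory ID_num roomNum dorm action → Spec_findStudentAdmin dormitory ID_num roomNum dorm action (findStudentAdmin dormitory ID_num roomNum dorm action)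

-- ===== LEMMAS AND PROOFS =====

-- ---- the non-'remove' case ----
theorem scanStudents_nonremove (students : List String) (ID roomNum dorm action dn rm : String)
    (h : (action == "remove") = false) :
    pvA_scanStudents students ID roomNum dorm action dn rm
      = if (action == "add") && students.contains ID then some false else none := by
  induction students with
  | nil => simp [pvA_scanStudents]
  | cons s rest ih =>
    simp only [pvA_scanStudents, h, Bool.and_false, ih, List.contains_cons]
    by_cases hs : (s == ID) = true
    · have h2 : (ID == s) = true := by simpa [BEq.comm] using hs
      cases hA : (action == "add") <;> simp [hs, h2]
    · have hs' : (s == ID) = false := by simpa using hs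
      have h2 : (ID == s) = false := by simpa [BEq.comm] using hs
      simp [hs', h2]

theorem scanRooms_nonremove (rooms : List (String × List String)) (ID roomNum dorm action dn : String)
    (h : (action == "remove") = false) :
    pvA_scanRooms rooms ID roomNum dorm action dn
      = if (action == "add") && rooms.any (fun q => q.2.contains ID) then some false else none := by
  induction rooms with
  | nil => simp [pvA_scanRooms]
  | cons p rest ih =>
    obtain ⟨rm, studs⟩ := p
    simp only [pvA_scanRooms, scanStudents_nonremove _ _ _ _ _ _ _ h, ih, List.any_cons]
    cases hA : (action == "add")
    · simp [hA]
    · by_cases hc : ID ∈ studs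
      · simp [hA, hc]
      · have hcb : studs.contains ID = false := by simpa using hc
        simp only [hA, hcb, Bool.true_and, Bool.and_false, Bool.false_or]
        simp

theorem scanDorms_nonremove (dorms : List (String × List (String × List String))) (ID roomNum dorm action : String)
    (h : (action == "remove") = false) :
    pvA_scanDorms dorms ID roomNum dorm action
      = if (action == "add") && dorms.any (fun p => p.2.any fun q => q.2.contains ID) then some false else none := by
  induction dorms with
  | nil => simp [pvA_scanDorms]
  | cons p rest ih =>
    obtain ⟨dn, rooms⟩ := p
    simp only [pvA_scanDorms, scanRooms_nonremove _ _ _ _ _ _ h, ih, List.any_cons]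
    cases hA : (action == "add")
    · simp [hA]
    · by_cases hc : rooms.any (fun q => q.2.contains ID) = true
      · simp only [hA, hc, Bool.true_and, Bool.true_or, Bool.and_true]
        simp [hc]
      · have hc' : rooms.any (fun q => q.2.contains ID) = false := by simpa using hc
        simp only [hA, hc', Bool.true_and, Bool.and_false, Bool.false_or]
        simp

-- ---- the 'remove' case ----
theorem scanStudents_remove (students : List String) (ID roomNum dorm dn rm : String) :
    pvA_scanStudents students ID roomNum dorm "remove" dn rm
      = if (rm == roomNum) && (dn == dorm) && students.contains ID then some true else none := by
  induction students with
  | nil => simp [pvA_scanStudents]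
  | cons s rest ih =>
    simp only [pvA_scanStudents, ih, List.contains_cons]
    by_cases hs : (s == ID) = true
    · have h2 : (ID == s) = true := by simpa [BEq.comm] using hs
      cases hr : (rm == roomNum) <;> cases hd : (dn == dorm) <;> simp [hs, h2]
    · have hs' : (s == ID) = false := by simpa using hs
      have h2 : (ID == s) = false := by simpa [BEq.comm] using hs
      simp [hs', h2]

theorem scanRooms_remove_offdorm (rooms : List (String × List String)) (ID roomNum dorm dn : String)
    (h : (dn == dorm) = false) :
    pvA_scanRooms rooms ID roomNum dorm "remove" dn = none := by
  induction rooms with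
  | nil => simp [pvA_scanRooms]
  | cons p rest ih =>
    obtain ⟨rm, studs⟩ := p
    simp [pvA_scanRooms, scanStudents_remove, h, ih]

theorem scanRooms_remove_missing (rooms : List (String × List String)) (ID roomNum dorm dn : String)
    (h : ∀ p ∈ rooms, (p.1 == roomNum) = false) :
    pvA_scanRooms rooms ID roomNum dorm "remove" dn = none := by
  induction rooms with
  | nil => simp [pvA_scanRooms]
  | cons p rest ih =>
    obtain ⟨rm, studs⟩ := p
    have h1 : (rm == roomNum) = false := h (rm, studs) (by simp)
    simp [pvA_scanRooms, scanStudents_remove, h1,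
      ih (fun q hq => h q (List.mem_cons_of_mem _ hq))]

theorem scanRooms_remove (rooms : List (String × List String)) (ID roomNum dorm dn : String)
    (hnd : (rooms.map Prod.fst).Nodup) :
    pvA_scanRooms rooms ID roomNum dorm "remove" dn
      = if (dn == dorm) && (PySem.Dict.getD (PySem.Dict.mk rooms) roomNum []).contains ID
        then some true else none := by
  induction rooms with
  | nil => simp [pvA_scanRooms, PySem.Dict.getD, PySem.Dict.get?]
  | cons p rest ih =>
    obtain ⟨rm, studs⟩ := p
    have hgd : PySem.Dict.getD (PySem.Dict.mk ((rm, studs) :: rest)) roomNum []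
        = if (rm == roomNum) = true then studs
          else PySem.Dict.getD (PySem.Dict.mk rest) roomNum [] := by
      simp only [PySem.Dict.getD, PySem.Dict.get?_mk_cons]
      split <;> rfl
    by_cases hr : (rm == roomNum) = true
    · have hrm : rm = roomNum := by simpa using hr
      have hmiss : ∀ q ∈ rest, (q.1 == roomNum) = false := by
        intro q hq
        have : roomNum ∉ rest.map Prod.fst := by
          subst hrm; exact (List.nodup_cons.mp (by simpa using hnd)).1
        have : q.1 ≠ roomNum := fun he => this (he ▸ List.mem_map_of_mem hq)
        simpa using this
      simp only [pvA_scanRooms, scanStudents_remove, hgd, hr, if_true, Bool.true_and]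
      cases hd : (dn == dorm) <;> cases hc : studs.contains ID <;>
        simp [scanRooms_remove_missing rest ID roomNum dorm dn hmiss]
    · have hr' : (rm == roomNum) = false := by simpa using hr
      have hnd' : (rest.map Prod.fst).Nodup := (List.nodup_cons.mp (by simpa using hnd)).2
      simp [pvA_scanRooms, scanStudents_remove, hgd, hr', ih hnd']

theorem scanDorms_remove_missing (dorms : List (String × List (String × List String))) (ID roomNum dorm : String)
    (h : ∀ p ∈ dorms, (p.1 == dorm) = false) :
    pvA_scanDorms dorms ID roomNum dorm "remove" = none := by
  induction dorms with
  | nil => simp [pvA_scanDorms]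
  | cons p rest ih =>
    obtain ⟨dn, rooms⟩ := p
    have h1 : (dn == dorm) = false := h (dn, rooms) (by simp)
    simp [pvA_scanDorms, scanRooms_remove_offdorm rooms ID roomNum dorm dn h1,
      ih (fun q hq => h q (List.mem_cons_of_mem _ hq))]

theorem scanDorms_remove (dorms : List (String × List (String × List String))) (ID roomNum dorm : String)
    (hnd : (dorms.map Prod.fst).Nodup) (hin : ∀ p ∈ dorms, (p.2.map Prod.fst).Nodup) :
    pvA_scanDorms dorms ID roomNum dorm "remove"
      = if (PySem.Dict.getD (PySem.Dict.mk (PySem.Dict.getD (PySem.Dict.mk dorms) dorm []))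
              roomNum []).contains ID
        then some true else none := by
  induction dorms with
  | nil => simp [pvA_scanDorms, PySem.Dict.getD, PySem.Dict.get?]
  | cons p rest ih =>
    obtain ⟨dn, rooms⟩ := p
    have hgd : PySem.Dict.getD (PySem.Dict.mk ((dn, rooms) :: rest)) dorm []
        = if (dn == dorm) = true then rooms
          else PySem.Dict.getD (PySem.Dict.mk rest) dorm [] := by
      simp only [PySem.Dict.getD, PySem.Dict.get?_mk_cons]
      split <;> rfl
    have hroom : (rooms.map Prod.fst).Nodup := hin (dn, rooms) (by simp)
    by_cases hd : (dn == dorm) = true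
    · have hdm : dn = dorm := by simpa using hd
      have hmiss : ∀ q ∈ rest, (q.1 == dorm) = false := by
        intro q hq
        have : dorm ∉ rest.map Prod.fst := by
          subst hdm; exact (List.nodup_cons.mp (by simpa using hnd)).1
        have : q.1 ≠ dorm := fun he => this (he ▸ List.mem_map_of_mem hq)
        simpa using this
      simp only [pvA_scanDorms, scanRooms_remove rooms ID roomNum dorm dn hroom, hgd, hd,
        if_true, Bool.true_and]
      cases hc : (PySem.Dict.getD (PySem.Dict.mk rooms) roomNum []).contains ID <;>
        simp [scanDorms_remove_missing rest ID roomNum dorm hmiss]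
    · have hd' : (dn == dorm) = false := by simpa using hd
      have hnd' : (rest.map Prod.fst).Nodup := (List.nodup_cons.mp (by simpa using hnd)).2
      simp [pvA_scanDorms, scanRooms_remove rooms ID roomNum dorm dn hroom, hd', hgd,
        ih hnd' (fun q hq => hin q (List.mem_cons_of_mem _ hq))]

-- ===== VERDICT (by name: the statement is the Claim_ definition above) =====
theorem findStudentAdmin_spec : Claim_equal_findStudentAdmin := by
  intro dormitory ID roomNum dorm action _ hpre
  unfold Spec_findStudentAdmin findStudentAdmin findStudentAdmin_alt
  by_cases hr : action = "remove"
  · subst hr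
    rw [scanDorms_remove dormitory ID roomNum dorm hpre.1 hpre.2]
    cases hc : (PySem.Dict.getD (PySem.Dict.mk (PySem.Dict.getD (PySem.Dict.mk dormitory) dorm []))
        roomNum []).contains ID <;> simp
  · have hr' : (action == "remove") = false := by simpa using hr
    rw [scanDorms_nonremove dormitory ID roomNum dorm action hr']
    by_cases hA : (action == "add") = true
    · cases hc : dormitory.any (fun p => p.2.any fun q => q.2.contains ID) <;>
        simp [hr', hA]
    · have hA' : (action == "add") = false := by simpa using hA
      simp [hr', hA']
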